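-- pv_equiv track=rewrite | github.com/davideomento/Automated-Sports-Commentary | transfermarkt_api.py | clean_team_profile
-- ===== SOURCE A (Python) =====
-- def clean_team_profile(team_profile):
--     """Pulisce il profilo della squadra, restituisce None se team_profile è None"""
--     if team_profile is None:
--         return None
--
--     clean_profile = team_profile.copy()
--
--     keys_to_remove = [
--         "id", "url", "fax", "addressLine1", "addressLine2", "addressLine3",
--         "tel", "website", "email", "members", "membersDate", "legalForm",
--         "colors", "historicalCrests", "otherSports", "confederation", "fifaWorldRanking"
--     ]
--
--     for key in keys_to_remove:
--         clean_profile.pop(key, None)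
--
--     return clean_profile
-- ===== SOURCE B (Python) =====
-- def clean_team_profile(team_profile):
--     """Pulisce il profilo della squadra, restituisce None se team_profile è None"""
--     if team_profile is None:
--         return None
--     remove = set(
--         "id url fax addressLine1 addressLine2 addressLine3 "
--         "tel website email members membersDate legalForm "
--         "colors historicalCrests otherSports confederation fifaWorldRanking".split()
--     )
--     out = {}
--     for key, value in team_profile.items():
--         if key not in remove:
--             out[key] = value
--     return out
-- ===== Notes on version B (the rewrite author's own statement) =====
-- stated objective: alternative
-- what changed: B builds a fresh dict in one explicit pass over the profile's items, skipping keys found in a removal set parsed from one space-separated string, instead of copying the whole dict and popping each of 17 fixed keys in turn.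
import Mathlib
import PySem

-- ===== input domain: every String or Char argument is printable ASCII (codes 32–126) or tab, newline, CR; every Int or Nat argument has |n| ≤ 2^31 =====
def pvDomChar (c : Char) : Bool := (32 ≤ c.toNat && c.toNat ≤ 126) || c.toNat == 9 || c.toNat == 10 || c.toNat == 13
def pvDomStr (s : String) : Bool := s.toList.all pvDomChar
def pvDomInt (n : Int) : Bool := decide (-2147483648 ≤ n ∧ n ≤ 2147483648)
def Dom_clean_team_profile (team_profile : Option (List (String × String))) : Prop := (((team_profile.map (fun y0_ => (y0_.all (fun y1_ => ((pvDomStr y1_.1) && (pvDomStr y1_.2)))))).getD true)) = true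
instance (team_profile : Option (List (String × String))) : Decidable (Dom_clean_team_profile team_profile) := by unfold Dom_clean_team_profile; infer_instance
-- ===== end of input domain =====

-- B rebuilds the profile in one explicit insert loop that skips keys in a removal set parsed from a split string, instead of copying the dict and popping 17 fixed keys; alternative, same cost.

-- ===== PORT A =====
-- the fixed list of keys A pops, in A's order
def pvKeysToRemove : List String :=
  ["id", "url", "fax", "addressLine1", "addressLine2", "addressLine3",
   "tel", "website", "email", "members", "membersDate", "legalForm",
   "colors", "historicalCrests", "otherSports", "confederation", "fifaWorldRanking"]

-- clean_profile.pop(key, None): remove the entry with that key if present (dict keys are unique)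
def pvPopKey (d : List (String × String)) (k : String) : List (String × String) :=
  d.eraseP (fun p => p.1 == k)

def clean_team_profile (team_profile : Option (List (String × String))) : Option (List (String × String)) :=
  match team_profile with
  | none => none
  | some d => some (pvKeysToRemove.foldl pvPopKey d)

-- ===== PORT B =====
-- remove = set("id url … fifaWorldRanking".split())
def pvRemoveSet : PySem.Set String :=
  PySem.Set.ofList (PySem.Str.split₀
    "id url fax addressLine1 addressLine2 addressLine3 tel website email members membersDate legalForm colors historicalCrests otherSports confederation fifaWorldRanking")

def clean_team_profile_alt (team_profile : Option (List (String × String))) : Option (List (String × String)) :=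
  match team_profile with
  | none => none
  | some d =>
      -- out = {}; for key, value in team_profile.items(): if key not in remove: out[key] = value
      some ((d.foldl
        (fun out p => if PySem.Set.contains pvRemoveSet p.1 then out else out.insert p.1 p.2)
        PySem.Dict.empty).items)

-- ===== PRECONDITION & SPEC =====
-- Pre_ excludes association lists with duplicate keys, which cannot arise from a Python dict
-- (A's pop would remove only the first duplicate while B's dict rebuild keeps the last one).
def Pre_clean_team_profile (team_profile : Option (List (String × String))) : Prop :=
  ((team_profile.getD []).map Prod.fst).Nodup
instance (team_profile : Option (List (String × String))) : Decidable (Pre_clean_team_profile team_profile) := by unfold Pre_clean_team_profile; infer_instance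

def pvWitness_clean_team_profile : (Option (List (String × String))) :=
  some [("id", "5"), ("name", "Inter")]

def Spec_clean_team_profile (team_profile : Option (List (String × String))) (out : Option (List (String × String))) : Prop := out = clean_team_profile_alt team_profile
instance (team_profile : Option (List (String × String))) (out : Option (List (String × String))) : Decidable (Spec_clean_team_profile team_profile out) := by unfold Spec_clean_team_profile; infer_instance

-- ===== CLAIM (what is proved, stated in full; the proofs are below) =====
def Claim_equal_clean_team_profile : Prop := ∀ (team_profile : Option (List (String × String))), Dom_clean_team_profile team_profile → Pre_clean_team_profile team_profile → Spec_clean_team_profile team_profile (clean_team_profile team_profile)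

-- ===== LEMMAS AND PROOFS =====

-- the removal set B parses at runtime is exactly the key list A pops
set_option maxRecDepth 8192 in
theorem pvRemoveSet_eq : pvRemoveSet = pvKeysToRemove := by decide

-- on a nodup-keyed association list, erasing the first entry with key k erases every entry with key k
theorem pvErase_eq_filter (k : String) :
    ∀ (d : List (String × String)), (d.map Prod.fst).Nodup →
      d.eraseP (fun p => p.1 == k) = d.filter (fun p => !(p.1 == k)) := by
  intro d
  induction d with
  | nil => intro _; rfl
  | cons p t ih =>
    intro h
    simp only [List.map_cons, List.nodup_cons] at h
    by_cases hk : p.1 = k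
    · have ht : t.filter (fun q => !(q.1 == k)) = t := by
        apply List.filter_eq_self.mpr
        intro q hq
        have : q.1 ≠ p.1 := fun e => h.1 (e ▸ List.mem_map_of_mem hq)
        simp [hk ▸ this]
      simp [hk, ht]
    · simp [hk, ih h.2]

-- folding pvPopKey over a key list is one filter by non-membership
theorem pvFoldPop_eq_filter :
    ∀ (ks : List String) (d : List (String × String)), (d.map Prod.fst).Nodup →
      ks.foldl pvPopKey d = d.filter (fun p => !(ks.contains p.1)) := by
  intro ks
  induction ks with
  | nil => intro d _; simp
  | cons k kt ih =>
    intro d h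
    have hstep : pvPopKey d k = d.filter (fun p => !(p.1 == k)) := pvErase_eq_filter k d h
    have hnd : ((d.filter (fun p => !(p.1 == k))).map Prod.fst).Nodup := by
      exact (List.Sublist.map Prod.fst ((List.filter_sublist (l := d)))).nodup h
    simp only [List.foldl_cons, hstep, ih _ hnd, List.filter_filter]
    apply List.filter_congr
    intro p _
    by_cases hpk : p.1 = k <;> simp [hpk, Bool.and_comm]

-- a skip-or-step fold is a fold over the filtered list
theorem pvFoldl_if_skip {α β : Type} (p : β → Bool) (g : α → β → α) :
    ∀ (l : List β) (acc : α),
      l.foldl (fun a x => if p x then a else g a x) acc = (l.filter (fun x => !(p x))).foldl g acc := by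
  intro l
  induction l with
  | nil => intro acc; rfl
  | cons x t ih =>
    intro acc
    by_cases hx : p x = true <;> simp [hx, ih]

-- B's insert loop over fresh nodup keys lists exactly the pairs it inserts
theorem pvFoldInsert_items (l : List (String × String)) (h : (l.map Prod.fst).Nodup) :
    ((l.foldl (fun (out : PySem.Dict String String) p => out.insert p.1 p.2) PySem.Dict.empty).items) = l := by
  have := PySem.Dict.items_foldl_insert_fresh (d := (PySem.Dict.empty : PySem.Dict String String))
    (l := l) (k := Prod.fst) (v := Prod.snd)
    (by intro a _; simp [PySem.Dict.contains_empty]) h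
  simpa using this

-- ===== VERDICT (by name: the statement is the Claim_ definition above) =====
theorem clean_team_profile_spec : Claim_equal_clean_team_profile := by
  intro tp _ hpre
  unfold Spec_clean_team_profile
  cases tp with
  | none => rfl
  | some d =>
    have hnd : (d.map Prod.fst).Nodup := by
      simpa [Pre_clean_team_profile] using hpre
    simp only [clean_team_profile, clean_team_profile_alt]
    rw [pvFoldPop_eq_filter pvKeysToRemove d hnd,
        pvFoldl_if_skip (fun k => PySem.Set.contains pvRemoveSet k.1)
          (fun (out : PySem.Dict String String) p => out.insert p.1 p.2) d PySem.Dict.empty,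
        pvFoldInsert_items, pvRemoveSet_eq]
    · simp [PySem.Set.contains]
    · refine (List.Sublist.map Prod.fst ?_).nodup hnd
      exact List.filter_sublist
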